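-- pv_equiv track=rewrite | github.com/ohad1s/Intro_to_Python | tirgul_6/HW_sol.py | isMarsennePrime
-- ===== SOURCE A (Python) =====
-- def isPrime(number):
--     for x in range(2,number):
--         if number%x==0:
--             return False
--     return True
--
-- def isMarsennePrime(n):
--     if isPrime(n)==False:
--         return False
--     else:
--         for i in range(n):  #  2 ^ i - 1 == n ??
--           if (2**i == n+1):
--              return True
--         return False
-- ===== SOURCE B (Python) =====
-- def isMarsennePrime(n):
--     # Mersenne prime: n is prime and n = 2**k - 1.
--     if n < 2:
--         return False
--     m = n + 1
--     while m % 2 == 0: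
--         m //= 2
--     if m != 1:
--         return False
--     d = 3
--     while d * d <= n:
--         if n % d == 0:
--             return False
--         d += 2
--     return True
-- ===== Notes on version B (the rewrite author's own statement) =====
-- stated objective: alternative
-- what changed: Replaces A's trial division over all of 2..n-1 and its linear search for an exponent i with 2**i == n+1 by a halving loop deciding whether n+1 is a power of two followed by odd trial division up to sqrt(n).
import Mathlib
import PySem

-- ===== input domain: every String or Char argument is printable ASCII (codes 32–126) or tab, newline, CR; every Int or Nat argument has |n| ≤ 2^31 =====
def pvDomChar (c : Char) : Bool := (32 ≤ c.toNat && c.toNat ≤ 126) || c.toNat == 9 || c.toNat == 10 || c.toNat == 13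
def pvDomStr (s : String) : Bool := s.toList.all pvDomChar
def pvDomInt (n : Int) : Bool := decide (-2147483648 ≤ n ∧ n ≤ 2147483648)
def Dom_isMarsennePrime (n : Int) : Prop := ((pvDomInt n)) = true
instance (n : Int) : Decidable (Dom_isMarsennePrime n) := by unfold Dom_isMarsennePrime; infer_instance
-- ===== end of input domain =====

-- B replaces A's full trial division over 2..n-1 and its linear search for i with 2**i == n+1
-- by a halving loop (is n+1 a power of two?) plus odd trial division up to √n.

-- ===== PORT A =====
-- for x in range(2, number): if number % x == 0: return False; return True
def pvIsPrime (number : Int) : Bool :=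
  (PySem.List.pyRange 2 number 1).all (fun x => !(PySem.Int.mod number x == 0))

def isMarsennePrime (n : Int) : Bool :=
  if pvIsPrime n == false then false
  else (PySem.List.pyRange 0 n 1).any (fun i => (2 : Int) ^ i.toNat == n + 1)

-- ===== PORT B =====
-- while m % 2 == 0: m //= 2  — the '1 ≤ m' conjunct is a totality guard only (B calls
-- this with m = n + 1 ≥ 3, where it always holds; Python's loop would not terminate at m = 0).
def pvOddPart (m : Int) : Int :=
  if _h : 1 ≤ m ∧ PySem.Int.mod m 2 = 0 then pvOddPart (PySem.Int.floordiv m 2) else m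
termination_by m.toNat
decreasing_by
  simp only [PySem.Int.floordiv_eq_ediv_of_pos (by omega : (0:Int) < 2)]
  have := PySem.Int.mod_eq_emod_of_pos (a := m) (by omega : (0:Int) < 2)
  omega

-- d = 3; while d * d <= n: if n % d == 0: return False; d += 2; return True
def pvTrial (n d : Int) : Bool :=
  if d * d ≤ n then
    if PySem.Int.mod n d == 0 then false else pvTrial n (d + 2)
  else true
termination_by (n + 1 - d).toNat
decreasing_by
  rename_i hle
  have hd : d ≤ d * d := by
    by_cases h0 : d ≤ 0
    · nlinarith
    · nlinarith
  omega

def isMarsennePrime_alt (n : Int) : Bool :=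
  if n < 2 then false
  else if pvOddPart (n + 1) ≠ 1 then false
  else pvTrial n 3

-- ===== PRECONDITION & SPEC =====
def Spec_isMarsennePrime (n : Int) (out : Bool) : Prop := out = isMarsennePrime_alt n
instance (n : Int) (out : Bool) : Decidable (Spec_isMarsennePrime n out) := by unfold Spec_isMarsennePrime; infer_instance

-- ===== CLAIM (what is proved, stated in full; the proofs are below) =====
def Claim_equal_isMarsennePrime : Prop := ∀ (n : Int), Dom_isMarsennePrime n → Spec_isMarsennePrime n (isMarsennePrime n)

-- ===== LEMMAS AND PROOFS =====

-- the halving loop returns 1 exactly on the (positive) powers of two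
theorem pvOddPart_eq_one_iff (m : Int) (hm : 1 ≤ m) :
    pvOddPart m = 1 ↔ ∃ k : ℕ, m = 2 ^ k := by
  induction m using pvOddPart.induct with
  | case1 m h ih =>
    have h2 : m % 2 = 0 := by
      rw [← PySem.Int.mod_eq_emod_of_pos (a := m) (by omega : (0:Int) < 2)]; exact h.2
    have hf : PySem.Int.floordiv m 2 = m / 2 :=
      PySem.Int.floordiv_eq_ediv_of_pos (by omega : (0:Int) < 2)
    rw [pvOddPart, dif_pos h, hf]
    have ih' := ih (by rw [hf]; omega)
    rw [hf] at ih'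
    rw [ih']
    constructor
    · rintro ⟨k, hk⟩
      exact ⟨k + 1, by rw [pow_succ, ← hk]; omega⟩
    · rintro ⟨k, rfl⟩
      cases k with
      | zero => exfalso; omega
      | succ j =>
        refine ⟨j, ?_⟩
        have : (2:Int) ^ (j+1) = 2 * 2 ^ j := by rw [pow_succ]; ring
        omega
  | case2 m h =>
    have h2 : m % 2 = 1 := by
      have := PySem.Int.mod_eq_emod_of_pos (a := m) (by omega : (0:Int) < 2)
      have : ¬ PySem.Int.mod m 2 = 0 := fun hc => h ⟨hm, hc⟩
      omega
    rw [pvOddPart, dif_neg h]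
    constructor
    · rintro rfl; exact ⟨0, rfl⟩
    · rintro ⟨k, rfl⟩
      cases k with
      | zero => rfl
      | succ j =>
        exfalso
        have : (2:Int) ^ (j+1) = 2 * 2 ^ j := by rw [pow_succ]; ring
        omega

-- loop invariant of the odd trial division
theorem pvTrial_eq_true_iff (n d : Int) (hd : 3 ≤ d) :
    pvTrial n d = true ↔ ∀ j : ℕ, (d + 2*j) * (d + 2*j) ≤ n → ¬ (d + 2*j) ∣ n := by
  induction d using pvTrial.induct n with
  | case1 d hle hmod =>
    have hdvd : d ∣ n := by
      rw [← PySem.Int.mod_eq_zero_iff_dvd]; exact of_decide_eq_true hmod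
    rw [pvTrial, if_pos hle, if_pos hmod]
    apply iff_of_false (by simp)
    push Not
    exact ⟨0, by push_cast; simpa using hle, by push_cast; simpa using hdvd⟩
  | case2 d hle hmod ih =>
    rw [pvTrial, if_pos hle, if_neg hmod, ih (by omega)]
    have hnd : ¬ d ∣ n := by
      rw [← PySem.Int.mod_eq_zero_iff_dvd]; simpa using hmod
    constructor
    · intro hall j hj
      cases j with
      | zero => push_cast; simpa using hnd
      | succ i =>
        have := hall i (by push_cast at hj ⊢; nlinarith [hj])
        push_cast at hj ⊢; push_cast at this
        convert this using 2
        all_goals ring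
    · intro hall j hj
      have := hall (j+1) (by push_cast at hj ⊢; nlinarith [hj])
      push_cast at this ⊢
      convert this using 2 <;> ring
  | case3 d hgt =>
    rw [pvTrial, if_neg hgt]
    simp only [true_iff]
    intro j hj
    exfalso
    apply hgt
    have hj' : (d + 2*(j:Int)) * (d + 2*j) ≤ n := hj
    nlinarith [hj', (by positivity : (0:Int) ≤ (j:Int))]

-- B's trial division decides primality of odd n ≥ 3
theorem pvTrial_three_iff_prime (n : Int) (hn : 3 ≤ n) (hodd : ¬ (2:Int) ∣ n) :
    pvTrial n 3 = true ↔ Nat.Prime n.toNat := by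
  have hcast : ((n.toNat : Int)) = n := Int.toNat_of_nonneg (by omega)
  rw [pvTrial_eq_true_iff n 3 le_rfl]
  constructor
  · intro htr
    rw [Nat.prime_def_le_sqrt]
    refine ⟨by omega, fun m hm hsq hdvd => ?_⟩
    rw [Nat.le_sqrt] at hsq
    rcases Nat.even_or_odd m with he | ho
    · -- an even divisor of odd n is impossible
      apply hodd
      have h2m : (2:ℕ) ∣ m := he.two_dvd
      have : (2:ℕ) ∣ n.toNat := h2m.trans hdvd
      have := Int.natCast_dvd_natCast.mpr this
      rwa [hcast] at this
    · have hm3 : 3 ≤ m := by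
        rcases ho with ⟨c, hc⟩; omega
      obtain ⟨j, hj⟩ : ∃ j : ℕ, m = 3 + 2 * j := by
        rcases ho with ⟨c, hc⟩; exact ⟨c - 1, by omega⟩
      apply htr j
      · have : (m : Int) * m ≤ (n.toNat : Int) := by exact_mod_cast hsq
        rw [hcast] at this
        calc ((3:Int) + 2*j) * (3 + 2*j) = (m:Int) * m := by push_cast [hj]; ring
          _ ≤ n := this
      · have : (m : Int) ∣ (n.toNat : Int) := Int.natCast_dvd_natCast.mpr hdvd
        rw [hcast] at this
        calc ((3:Int) + 2*(j:Int)) = (m:Int) := by push_cast [hj]; ring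
          _ ∣ n := this
  · intro hp j hj hdvd
    set m : ℕ := 3 + 2 * j with hm
    have hdj : ((m : Int)) = 3 + 2*(j:Int) := by push_cast [hm]; ring
    have hdvdN : m ∣ n.toNat := by
      rw [← Int.natCast_dvd_natCast, hdj, hcast]; exact hdvd
    have hsq : m * m ≤ n.toNat := by
      have : ((m:Int)) * m ≤ n := by rw [hdj]; exact hj
      have := this.trans_eq hcast.symm
      exact_mod_cast this
    rcases (Nat.Prime.eq_one_or_self_of_dvd hp m hdvdN) with h1 | h1
    · omega
    · have : m < m * m := by nlinarith [hm]
      omega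

-- A's full trial division decides primality of n ≥ 2
theorem pvIsPrime_iff_prime (n : Int) (hn : 2 ≤ n) :
    pvIsPrime n = true ↔ Nat.Prime n.toNat := by
  have hcast : ((n.toNat : Int)) = n := Int.toNat_of_nonneg (by omega)
  rw [pvIsPrime, List.all_eq_true]
  rw [Nat.prime_def_lt']
  constructor
  · intro hall
    refine ⟨by omega, fun m hm hlt hdvd => ?_⟩
    have hx : (m : Int) ∈ PySem.List.pyRange 2 n 1 := by
      rw [PySem.List.mem_pyRange_one]
      constructor
      · exact_mod_cast hm
      · calc ((m:Int)) < (n.toNat : Int) := by exact_mod_cast hlt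
          _ = n := hcast
    have := hall _ hx
    simp only [Bool.not_eq_eq_eq_not, Bool.not_true, beq_eq_false_iff_ne, ne_eq] at this
    apply this
    rw [PySem.Int.mod_eq_zero_iff_dvd]
    have : (m : Int) ∣ (n.toNat : Int) := Int.natCast_dvd_natCast.mpr hdvd
    rwa [hcast] at this
  · rintro ⟨-, hp⟩ x hx
    rw [PySem.List.mem_pyRange_one] at hx
    simp only [Bool.not_eq_eq_eq_not, Bool.not_true, beq_eq_false_iff_ne, ne_eq]
    rw [PySem.Int.mod_eq_zero_iff_dvd]
    intro hdvd
    have hx2 : 2 ≤ x := hx.1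
    have hxn : x < n := hx.2
    have hdN : x.toNat ∣ n.toNat := by
      rw [← Int.natCast_dvd_natCast]
      rw [Int.toNat_of_nonneg (by omega), hcast]
      exact hdvd
    exact hp x.toNat (by omega) (by omega) hdN

-- k + 2 ≤ 2^k for k ≥ 2 (used to bound the exponent inside A's search range)
theorem pvAdd_two_le_two_pow (k : ℕ) (hk : 2 ≤ k) : k + 2 ≤ 2 ^ k := by
  induction k with
  | zero => omega
  | succ j ih =>
    rcases Nat.lt_or_ge j 2 with hj | hj
    · interval_cases j <;> simp_all
    · have := ih hj
      have h1 : 2 ^ (j+1) = 2 * 2 ^ j := by rw [pow_succ]; ring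
      omega

-- A's power search succeeds exactly when n+1 is a power of two (n ≥ 2)
theorem pvAnyPow_iff (n : Int) (hn : 2 ≤ n) :
    ((PySem.List.pyRange 0 n 1).any (fun i => (2 : Int) ^ i.toNat == n + 1)) = true
      ↔ ∃ k : ℕ, n + 1 = 2 ^ k := by
  rw [List.any_eq_true]
  constructor
  · rintro ⟨i, hi, hEq⟩
    exact ⟨i.toNat, (of_decide_eq_true hEq).symm⟩
  · rintro ⟨k, hk⟩
    refine ⟨(k : Int), ?_, by simp [hk.symm]⟩
    rw [PySem.List.mem_pyRange_one]
    refine ⟨by omega, ?_⟩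
    -- k < n : from 2^k = n+1 ≥ 3 we get k ≥ 2, and then k + 2 ≤ 2^k = n+1
    have h3 : (3:Int) ≤ 2 ^ k := by rw [← hk]; omega
    have hk2 : 2 ≤ k := by
      rcases k with _ | _ | k
      · norm_num at h3
      · norm_num at h3
      · omega
    have hc : ((k:Int)) + 2 ≤ 2 ^ k := by exact_mod_cast pvAdd_two_le_two_pow k hk2
    rw [← hk] at hc
    omega

-- ===== VERDICT (by name: the statement is the Claim_ definition above) =====
theorem isMarsennePrime_spec : Claim_equal_isMarsennePrime := by
  intro n _
  unfold Spec_isMarsennePrime isMarsennePrime isMarsennePrime_alt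
  by_cases h2 : n < 2
  · rw [if_pos h2]
    by_cases h0 : n ≤ 0
    · rw [PySem.List.pyRange_one_eq_nil (by omega)]
      cases hP : pvIsPrime n <;> simp [hP]
    · have hn1 : n = 1 := by omega
      subst hn1
      decide
  · rw [if_neg h2]
    push Not at h2
    by_cases hpow : ∃ k : ℕ, n + 1 = 2 ^ k
    · have hop : pvOddPart (n + 1) = 1 := (pvOddPart_eq_one_iff (n + 1) (by omega)).mpr hpow
      have hcond : ¬ (pvOddPart (n + 1) ≠ 1) := not_not_intro hop
      rw [if_neg hcond]
      obtain ⟨k, hk⟩ := hpow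
      have h3' : (3:Int) ≤ 2 ^ k := by rw [← hk]; omega
      have hk2 : 2 ≤ k := by
        rcases k with _ | _ | k
        · norm_num at h3'
        · norm_num at h3'
        · omega
      have h4 : (4:Int) ≤ 2 ^ k := by
        have hn4 : (4:ℕ) ≤ 2 ^ k := by
          calc (4:ℕ) = 2 ^ 2 := by norm_num
            _ ≤ 2 ^ k := Nat.pow_le_pow_right (by norm_num) hk2
        exact_mod_cast hn4
      rw [← hk] at h4
      have h3 : 3 ≤ n := by omega
      have hodd : ¬ (2:Int) ∣ n := by
        have hd : (2:Int) ∣ 2 ^ k := dvd_pow_self 2 (by omega)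
        rw [← hk] at hd
        rintro ⟨c, rfl⟩
        rcases hd with ⟨e, he⟩
        omega
      have hA : ((PySem.List.pyRange 0 n 1).any (fun i => (2 : Int) ^ i.toNat == n + 1)) = true :=
        (pvAnyPow_iff n h2).mpr ⟨k, hk⟩
      have hiff : pvIsPrime n = pvTrial n 3 := by
        rw [Bool.eq_iff_iff, pvIsPrime_iff_prime n h2, pvTrial_three_iff_prime n h3 hodd]
      rw [← hiff]
      cases hP : pvIsPrime n
      · simp
      · rw [if_neg (by decide)]; exact hA
    · have hne : pvOddPart (n + 1) ≠ 1 := fun h =>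
        hpow ((pvOddPart_eq_one_iff (n + 1) (by omega)).mp h)
      rw [if_pos hne]
      have hAf : ((PySem.List.pyRange 0 n 1).any (fun i => (2 : Int) ^ i.toNat == n + 1)) = false := by
        rcases Bool.eq_false_or_eq_true ((PySem.List.pyRange 0 n 1).any (fun i => (2 : Int) ^ i.toNat == n + 1)) with h | h
        · exact absurd ((pvAnyPow_iff n h2).mp h) hpow
        · exact h
      cases hP : pvIsPrime n <;> simp [hAf]
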